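-- pv_equiv track=rewrite | github.com/EffePen/advent-of-code | 2024/day_07/solver.py | recurse_pt1
-- ===== SOURCE A (Python) =====
-- def recurse_pt1(tot, first_num, reversed_nums):
--     for n_idx, n in enumerate(reversed_nums):
--         # if divisible
--         if tot % n == 0:
--             mul_attempt = recurse_pt1(tot // n, first_num, reversed_nums[n_idx+1:])
--             if mul_attempt:
--                 return mul_attempt
--
--         # otherwise try subtracting
--         sub_attempt = recurse_pt1(tot - n, first_num, reversed_nums[n_idx+1:])
--         return sub_attempt
--
--     return first_num == tot
-- ===== SOURCE B (Python) =====
-- def recurse_pt1(tot, first_num, reversed_nums):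
--     # Breadth-first: fold over the numbers keeping every reachable total,
--     # then test whether first_num is among the final reachable totals.
--     reachable = [tot]
--     for n in reversed_nums:
--         nxt = []
--         for t in reachable:
--             if t % n == 0:
--                 nxt.append(t // n)
--             nxt.append(t - n)
--         reachable = nxt
--     return any(first_num == t for t in reachable)
-- ===== Notes on version B (the rewrite author's own statement) =====
-- stated objective: alternative
-- what changed: Replaces the depth-first early-return recursion by a breadth-first fold that accumulates the list of all reachable totals and checks first_num against it at the end.
import Mathlib
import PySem

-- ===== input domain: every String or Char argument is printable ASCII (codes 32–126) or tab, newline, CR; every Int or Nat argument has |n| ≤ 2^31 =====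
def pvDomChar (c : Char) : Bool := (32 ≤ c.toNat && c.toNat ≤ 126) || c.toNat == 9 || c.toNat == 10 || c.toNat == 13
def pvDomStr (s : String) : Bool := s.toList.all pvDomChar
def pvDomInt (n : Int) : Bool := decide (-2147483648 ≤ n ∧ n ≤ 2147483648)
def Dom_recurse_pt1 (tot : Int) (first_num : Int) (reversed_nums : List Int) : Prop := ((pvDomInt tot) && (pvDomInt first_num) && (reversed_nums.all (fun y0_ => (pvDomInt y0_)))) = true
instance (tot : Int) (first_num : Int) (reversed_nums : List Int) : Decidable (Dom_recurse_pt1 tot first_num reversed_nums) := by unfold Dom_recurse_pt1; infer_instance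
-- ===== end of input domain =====

-- B replaces A's depth-first early-return recursion by a breadth-first fold over
-- the list of all reachable totals (alternative decomposition, same cost class).

-- ===== PORT A =====
-- A's loop always returns inside its first iteration, so it is head recursion:
-- on the empty list the loop body never runs and A returns first_num == tot.
def recurse_pt1 (tot : Int) (first_num : Int) (reversed_nums : List Int) : Bool :=
  match reversed_nums with
  | [] => first_num == tot
  | n :: rest =>
    if PySem.Int.mod tot n == 0 then
      let mul_attempt := recurse_pt1 (PySem.Int.floordiv tot n) first_num rest
      if mul_attempt then mul_attempt
      else recurse_pt1 (tot - n) first_num rest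
    else recurse_pt1 (tot - n) first_num rest

-- ===== PORT B =====
-- one level of B's breadth-first expansion (inner 'for t in reachable' loop)
def pvStep (n : Int) (reachable : List Int) : List Int :=
  reachable.flatMap (fun t =>
    (if PySem.Int.mod t n == 0 then [PySem.Int.floordiv t n] else []) ++ [t - n])

def recurse_pt1_alt (tot : Int) (first_num : Int) (reversed_nums : List Int) : Bool :=
  (reversed_nums.foldl (fun reachable n => pvStep n reachable) [tot]).any
    (fun t => first_num == t)

-- ===== PRECONDITION & SPEC =====
-- Pre_ excludes lists containing 0: there the Python A (and B) raises ZeroDivisionError.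
def Pre_recurse_pt1 (tot : Int) (first_num : Int) (reversed_nums : List Int) : Prop :=
  (0 : Int) ∉ reversed_nums
instance (tot : Int) (first_num : Int) (reversed_nums : List Int) : Decidable (Pre_recurse_pt1 tot first_num reversed_nums) := by unfold Pre_recurse_pt1; infer_instance
def pvWitness_recurse_pt1 : Int × Int × List Int := (6, 2, [3])

def Spec_recurse_pt1 (tot : Int) (first_num : Int) (reversed_nums : List Int) (out : Bool) : Prop := out = recurse_pt1_alt tot first_num reversed_nums
instance (tot : Int) (first_num : Int) (reversed_nums : List Int) (out : Bool) : Decidable (Spec_recurse_pt1 tot first_num reversed_nums out) := by unfold Spec_recurse_pt1; infer_instance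

-- ===== CLAIM (what is proved, stated in full; the proofs are below) =====
def Claim_equal_recurse_pt1 : Prop := ∀ (tot : Int) (first_num : Int) (reversed_nums : List Int), Dom_recurse_pt1 tot first_num reversed_nums → Pre_recurse_pt1 tot first_num reversed_nums → Spec_recurse_pt1 tot first_num reversed_nums (recurse_pt1 tot first_num reversed_nums)

-- ===== LEMMAS AND PROOFS =====
theorem pvStep_any (n : Int) (acc : List Int) (g : Int → Bool) :
    (pvStep n acc).any g =
      acc.any (fun t =>
        (if PySem.Int.mod t n == 0 then g (PySem.Int.floordiv t n) else false) || g (t - n)) := by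
  simp only [pvStep, List.any_flatMap]
  refine congrArg _ (funext fun t => ?_)
  split_ifs <;> simp

theorem pvFold_any (f : Int) (nums : List Int) :
    ∀ acc : List Int,
      (nums.foldl (fun reachable n => pvStep n reachable) acc).any (fun t => f == t) =
        acc.any (fun t => recurse_pt1 t f nums) := by
  induction nums with
  | nil => intro acc; simp [recurse_pt1]
  | cons n rest ih =>
    intro acc
    simp only [List.foldl_cons]
    rw [ih (pvStep n acc), pvStep_any]
    refine congrArg _ (funext fun t => ?_)
    show _ = recurse_pt1 t f (n :: rest)
    rw [recurse_pt1]
    split_ifs with h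
    · cases hm : recurse_pt1 (PySem.Int.floordiv t n) f rest <;> simp
    · simp

-- ===== VERDICT (by name: the statement is the Claim_ definition above) =====
theorem recurse_pt1_spec : Claim_equal_recurse_pt1 := by
  intro tot first_num reversed_nums _ _
  show recurse_pt1 tot first_num reversed_nums = recurse_pt1_alt tot first_num reversed_nums
  rw [recurse_pt1_alt, pvFold_any]
  simp
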